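-- pv_equiv track=rewrite | github.com/WAHIBAEZZIRARI/programe-the-mode-passe | programe the mode passe.py | longMAJ
-- ===== SOURCE A (Python) =====
-- def longMAJ(pas):
--         c = 0
--         c1 = 0
--
--         for i in pas:
--             if i.isupper():
--                 c1+= 1
--                 if c1 > c:
--                     c= c1
--             else:
--                 c1= 0
--
--         return c
-- ===== SOURCE B (Python) =====
-- def longMAJ(pas):
--     best = 0
--     i = 0
--     n = len(pas)
--     while i < n:
--         if pas[i].isupper():
--             j = i
--             while j < n and pas[j].isupper():
--                 j += 1
--             if j - i > best:
--                 best = j - i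
--             i = j
--         else:
--             i += 1
--     return best
-- ===== Notes on version B (the rewrite author's own statement) =====
-- stated objective: alternative
-- what changed: Replaces the running-counter-with-reset single pass by a run-segmentation scan: locate each maximal uppercase run with an inner scan, take its length, and keep the maximum.
import Mathlib
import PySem

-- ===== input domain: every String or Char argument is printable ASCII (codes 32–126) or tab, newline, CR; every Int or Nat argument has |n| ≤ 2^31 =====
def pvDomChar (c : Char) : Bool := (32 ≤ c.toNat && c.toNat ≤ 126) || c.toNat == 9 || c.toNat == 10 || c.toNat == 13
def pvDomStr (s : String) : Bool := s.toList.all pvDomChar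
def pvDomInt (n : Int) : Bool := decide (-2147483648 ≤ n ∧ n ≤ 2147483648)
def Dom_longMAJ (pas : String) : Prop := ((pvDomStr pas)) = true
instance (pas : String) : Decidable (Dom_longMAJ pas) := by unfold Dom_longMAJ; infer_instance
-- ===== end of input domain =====

-- B replaces A's running-counter-with-reset pass by a run-segmentation scan (find each maximal uppercase run, keep the max length); alternative decomposition, same cost.


-- ===== PORT A =====
-- for i in pas: if i.isupper(): c1 += 1; if c1 > c: c = c1  else: c1 = 0
def longMAJstep (s : Int × Int) (ch : Char) : Int × Int :=
  if PySem.Chars.isupper ch then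
    let c1 := s.2 + 1
    (if c1 > s.1 then c1 else s.1, c1)
  else (s.1, 0)

def longMAJ (pas : String) : Int := (pas.toList.foldl longMAJstep (0, 0)).1

-- ===== PORT B =====
-- the outer while of Source B: on an uppercase position take the maximal run (inner while = its length)
-- and jump past it, otherwise step one character on
def longMAJrun : List Char → Nat
  | [] => 0
  | c :: t =>
    if PySem.Chars.isupper c then
      max ((c :: t).takeWhile PySem.Chars.isupper).length
          (longMAJrun ((c :: t).dropWhile PySem.Chars.isupper))
    else longMAJrun t
termination_by l => l.length
decreasing_by
  · rename_i h
    rw [List.dropWhile_cons_of_pos h, List.length_cons]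
    exact Nat.lt_succ_of_le (List.length_dropWhile_le _ _)
  · simp

def longMAJ_alt (pas : String) : Int := (longMAJrun pas.toList : Int)

-- ===== PRECONDITION & SPEC =====
def Spec_longMAJ (pas : String) (out : Int) : Prop := out = longMAJ_alt pas
instance (pas : String) (out : Int) : Decidable (Spec_longMAJ pas out) := by unfold Spec_longMAJ; infer_instance

-- ===== CLAIM (what is proved, stated in full; the proofs are below) =====
def Claim_equal_longMAJ : Prop := ∀ (pas : String), Dom_longMAJ pas → Spec_longMAJ pas (longMAJ pas)

-- ===== LEMMAS AND PROOFS =====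

-- Nat shadow of A's fold state
def stepN (s : Nat × Nat) (ch : Char) : Nat × Nat :=
  if PySem.Chars.isupper ch then (max s.1 (s.2 + 1), s.2 + 1) else (s.1, 0)

theorem foldl_int_eq_nat (l : List Char) : ∀ (c c1 : Nat),
    l.foldl longMAJstep ((c : Int), (c1 : Int)) =
      (((l.foldl stepN (c, c1)).1 : Int), ((l.foldl stepN (c, c1)).2 : Int)) := by
  induction l with
  | nil => intro c c1; simp
  | cons ch t ih =>
    intro c c1
    by_cases h : PySem.Chars.isupper ch
    · have h1 : longMAJstep ((c : Int), (c1 : Int)) ch =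
          (((max c (c1 + 1) : Nat) : Int), ((c1 + 1 : Nat) : Int)) := by
        simp only [longMAJstep, h, if_true]
        refine Prod.ext ?_ rfl
        by_cases h2 : (c1 : Int) + 1 > (c : Int) <;> simp [h2] <;> push_cast <;> omega
      rw [List.foldl_cons, h1, ih]
      simp [stepN, h]
    · have h1 : longMAJstep ((c : Int), (c1 : Int)) ch = (((c : Nat) : Int), ((0 : Nat) : Int)) := by
        simp [longMAJstep, h]
      rw [List.foldl_cons, h1, ih]
      simp [stepN, h]

-- "best beyond c": the first component of the Nat fold is max c (G c1 l)
def G : Nat → List Char → Nat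
  | _, [] => 0
  | c1, ch :: t => if PySem.Chars.isupper ch then max (c1 + 1) (G (c1 + 1) t) else G 0 t

theorem foldl_fst_eq_G (l : List Char) : ∀ (c c1 : Nat),
    (l.foldl stepN (c, c1)).1 = max c (G c1 l) := by
  induction l with
  | nil => intro c c1; simp [G]
  | cons ch t ih =>
    intro c c1
    by_cases h : PySem.Chars.isupper ch <;>
      simp only [List.foldl_cons, stepN, G, h, if_true, Bool.false_eq_true, if_false, ih] <;> omega

def headUpper : List Char → Bool
  | [] => false
  | c :: _ => PySem.Chars.isupper c

theorem run_cons_neg {ch : Char} {t : List Char} (h : ¬ PySem.Chars.isupper ch = true) :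
    longMAJrun (ch :: t) = longMAJrun t := by
  rw [longMAJrun, if_neg h]

theorem run_cons_pos {ch : Char} {t : List Char} (h : PySem.Chars.isupper ch = true) :
    longMAJrun (ch :: t) =
      max ((ch :: t).takeWhile PySem.Chars.isupper).length
          (longMAJrun ((ch :: t).dropWhile PySem.Chars.isupper)) := by
  rw [longMAJrun, if_pos h]

theorem G_eq_run (l : List Char) : ∀ (c1 : Nat),
    G c1 l = if headUpper l then
        max (c1 + (l.takeWhile PySem.Chars.isupper).length)
            (longMAJrun (l.dropWhile PySem.Chars.isupper))
      else longMAJrun l := by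
  induction l with
  | nil => intro c1; simp [G, headUpper, longMAJrun]
  | cons ch t ih =>
    intro c1
    by_cases h : PySem.Chars.isupper ch
    · rw [G, if_pos h, ih (c1 + 1)]
      rw [show headUpper (ch :: t) = true from h, if_pos rfl,
        List.takeWhile_cons_of_pos h, List.dropWhile_cons_of_pos h, List.length_cons]
      cases t with
      | nil => simp [longMAJrun, headUpper]
      | cons d t' =>
        by_cases hd : PySem.Chars.isupper d
        · rw [show headUpper (d :: t') = true from hd, if_pos rfl]
          omega
        · rw [show headUpper (d :: t') = false from by simp [headUpper, hd],
            if_neg (by simp), List.takeWhile_cons_of_neg (by simp [hd]),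
            List.dropWhile_cons_of_neg (by simp [hd])]
          simp
    · rw [show headUpper (ch :: t) = false from by simp [headUpper, h],
        if_neg (by simp), run_cons_neg h, G, if_neg (by simp [h]), ih 0]
      cases t with
      | nil => simp [headUpper]
      | cons d t' =>
        by_cases hd : PySem.Chars.isupper d
        · rw [show headUpper (d :: t') = true from hd, if_pos rfl, run_cons_pos hd]
          simp
        · rw [show headUpper (d :: t') = false from by simp [headUpper, hd], if_neg (by simp)]

theorem G_zero_eq (l : List Char) : G 0 l = longMAJrun l := by
  rw [G_eq_run]
  cases l with
  | nil => simp
  | cons ch t =>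
    by_cases h : PySem.Chars.isupper ch
    · rw [show headUpper (ch :: t) = true from h, if_pos rfl, run_cons_pos h]
      simp
    · rw [show headUpper (ch :: t) = false from by simp [headUpper, h], if_neg (by simp)]

-- ===== VERDICT (by name: the statement is the Claim_ definition above) =====
theorem longMAJ_spec : Claim_equal_longMAJ := by
  intro pas _
  unfold Spec_longMAJ longMAJ longMAJ_alt
  have h0 : ((0 : Int), (0 : Int)) = (((0 : Nat) : Int), ((0 : Nat) : Int)) := rfl
  rw [h0, foldl_int_eq_nat, foldl_fst_eq_G, G_zero_eq]
  simp
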